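-- pv_equiv track=rewrite | github.com/PatrykIT/Code-Wars | Evening_Up_a_Workload/main.py | split_workload
-- ===== SOURCE A (Python) =====
-- def split_workload(workload):
--     if not workload:
--         return None, None
--
--     left = 0
--     right = sum(workload)
--
--     ratio = abs(left - right)
--     closest_match = ratio
--     best_split_place = 0
--     counter = 0
--
--     for number in workload:
--         counter += 1
--
--         left = left + number
--         right = right - number
--         ratio = abs(left - right)
--
--         if ratio < closest_match:
--             closest_match = ratio
--             best_split_place = counter
--
--     return best_split_place, closest_match
-- ===== SOURCE B (Python) =====
-- def split_workload(workload):
--     if not workload: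
--         return None, None
--     total = sum(workload)
--     prefixes = [0]
--     for x in workload:
--         prefixes.append(prefixes[-1] + x)
--     diffs = [abs(2 * p - total) for p in prefixes]
--     i = min(range(len(diffs)), key=diffs.__getitem__)
--     return i, diffs[i]
-- ===== Notes on version B (the rewrite author's own statement) =====
-- stated objective: alternative
-- what changed: Replaces A's fused single loop carrying left/right/ratio/best state with a two-phase decomposition: build the prefix-sum/diff list (diff_i = |2*prefix_i - total|, index 0 = empty left part), then take the first-occurrence argmin over it.
import Mathlib
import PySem

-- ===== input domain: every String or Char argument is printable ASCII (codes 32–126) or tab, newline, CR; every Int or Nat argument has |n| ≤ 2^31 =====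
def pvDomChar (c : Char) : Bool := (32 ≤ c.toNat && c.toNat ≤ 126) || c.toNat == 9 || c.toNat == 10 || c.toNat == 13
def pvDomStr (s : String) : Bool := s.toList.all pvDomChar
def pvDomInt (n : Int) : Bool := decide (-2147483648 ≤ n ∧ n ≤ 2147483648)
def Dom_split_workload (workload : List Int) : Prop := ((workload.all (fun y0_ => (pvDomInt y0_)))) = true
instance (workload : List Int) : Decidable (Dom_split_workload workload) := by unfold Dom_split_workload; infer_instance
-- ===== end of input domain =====

-- B is an alternative decomposition of A's fused loop: prefix sums + diff list + first-occurrence argmin; same O(n) cost.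

-- ===== PORT A =====
-- A's for-loop, state (left, right, closest_match, best_split_place, counter), transliterated as structural recursion.
def aLoop : List Int → Int → Int → Int → Int → Int → Int × Int
  | [], _, _, closest, best, _ => (best, closest)
  | n :: xs, left, right, closest, best, counter =>
    let counter' := counter + 1
    let left' := left + n
    let right' := right - n
    let ratio := |left' - right'|
    if ratio < closest then aLoop xs left' right' ratio counter' counter'
    else aLoop xs left' right' closest best counter'

def split_workload (workload : List Int) : Option Int × Option Int :=
  if workload = [] then (none, none)
  else
    let right := workload.sum
    let r := aLoop workload 0 right |0 - right| 0 0
    (some r.1, some r.2)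

-- ===== PORT B =====
-- prefixes[1:] of Source B (running prefix sums, starting from accumulator p).
def bPrefix : List Int → Int → List Int
  | [], _ => []
  | x :: xs, p => (p + x) :: bPrefix xs (p + x)

-- min(range(len(diffs)), key=diffs.__getitem__): first-occurrence argmin, carrying (best index, best value).
def bArgmin : List Int → Int → Int → Int → Int × Int
  | [], _, bi, bv => (bi, bv)
  | d :: ds, i, bi, bv =>
    if d < bv then bArgmin ds (i + 1) i d else bArgmin ds (i + 1) bi bv

def split_workload_alt (workload : List Int) : Option Int × Option Int :=
  if workload = [] then (none, none)
  else
    let total := workload.sum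
    let diffs := (0 :: bPrefix workload 0).map (fun p => |2 * p - total|)
    match diffs with
    | [] => (none, none)
    | d :: ds =>
      let r := bArgmin ds 1 0 d
      (some r.1, some r.2)

-- ===== PRECONDITION & SPEC =====
def Spec_split_workload (workload : List Int) (out : Option Int × Option Int) : Prop := out = split_workload_alt workload
instance (workload : List Int) (out : Option Int × Option Int) : Decidable (Spec_split_workload workload out) := by unfold Spec_split_workload; infer_instance

-- ===== CLAIM (what is proved, stated in full; the proofs are below) =====
def Claim_equal_split_workload : Prop := ∀ (workload : List Int), Dom_split_workload workload → Spec_split_workload workload (split_workload workload)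

-- ===== LEMMAS AND PROOFS =====

lemma aLoop_eq_bArgmin (xs : List Int) :
    ∀ (total left closest best counter : Int),
    aLoop xs left (total - left) closest best counter
      = bArgmin ((bPrefix xs left).map (fun p => |2 * p - total|)) (counter + 1) best closest := by
  induction xs with
  | nil => intro total left closest best counter; simp [aLoop, bPrefix, bArgmin]
  | cons n xs ih =>
    intro total left closest best counter
    simp only [aLoop, bPrefix, List.map, bArgmin]
    have h1 : left + n - (total - left - n) = 2 * (left + n) - total := by ring
    have h2 : total - left - n = total - (left + n) := by ring
    rw [h1, h2]
    by_cases h : |2 * (left + n) - total| < closest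
    · simp only [h, if_pos]
      exact ih total (left + n) _ (counter + 1) (counter + 1)
    · simp only [h, if_false]
      exact ih total (left + n) closest best (counter + 1)

-- ===== VERDICT (by name: the statement is the Claim_ definition above) =====
theorem split_workload_spec : Claim_equal_split_workload := by
  intro workload _
  unfold Spec_split_workload split_workload split_workload_alt
  by_cases h : workload = []
  · simp [h]
  · simp only [h, if_false, List.map]
    have := aLoop_eq_bArgmin workload workload.sum 0 |0 - workload.sum| 0 0
    simp only [Int.sub_zero] at this
    rw [this]
    norm_num
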